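-- pv_equiv track=rewrite | github.com/JulienDevillers/attributionBiplace | python/tandemAssign.py | evaluate
-- ===== SOURCE A (Python) =====
-- def evaluate(combination: list[str]):
--     tandems_assigned = set()
--     unassigneds = []
--     i = 0
--     for current_tandem_name in combination:
--         current_tandem_as_set = {current_tandem_name}
--         if not (tandems_assigned & current_tandem_as_set) == current_tandem_as_set:
--             tandems_assigned = tandems_assigned.union(current_tandem_as_set)
--         else:
--             unassigneds.append(i)
--         i += 1
--
--     return len(tandems_assigned), unassigneds
-- ===== SOURCE B (Python) =====
-- def evaluate(combination: list[str]):
--     # Build an index table name -> list of positions in one pass, then read the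
--     # answer off the table: distinct names = len(groups); duplicate positions =
--     # every position after the first in each group, sorted ascending.
--     groups = {}
--     for i, name in enumerate(combination):
--         groups.setdefault(name, []).append(i)
--     unassigneds = sorted(i for idxs in groups.values() for i in idxs[1:])
--     return len(groups), unassigneds
-- ===== Notes on version B (the rewrite author's own statement) =====
-- stated objective: alternative
-- what changed: A maintains a seen-set and tests each name against it to emit duplicate indices in order; B builds a name->positions index table in one pass, then reads the distinct count off the table size and the duplicate indices by flattening every group's all-but-first positions and sorting.
import Mathlib
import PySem

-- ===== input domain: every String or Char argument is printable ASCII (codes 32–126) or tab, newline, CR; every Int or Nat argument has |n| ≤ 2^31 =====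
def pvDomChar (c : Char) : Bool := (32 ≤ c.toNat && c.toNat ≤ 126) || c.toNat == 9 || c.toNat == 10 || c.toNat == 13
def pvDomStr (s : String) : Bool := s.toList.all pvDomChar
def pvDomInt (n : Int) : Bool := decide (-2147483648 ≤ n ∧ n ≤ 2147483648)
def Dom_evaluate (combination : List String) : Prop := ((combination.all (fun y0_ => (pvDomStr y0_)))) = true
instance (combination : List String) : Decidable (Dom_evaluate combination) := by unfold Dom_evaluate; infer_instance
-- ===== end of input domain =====

-- B replaces A's accumulate-and-test loop by a one-pass index table (name -> positions)
-- read off afterwards (distinct = table size, duplicates = sorted all-but-first positions);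
-- objective: alternative decomposition, same cost.

-- ===== PORT A =====
-- the body of A's for-loop, named so the proofs can speak about the fold
def evaluate_step (st : PySem.Set String × List Int × Int) (current_tandem_name : String) :
    PySem.Set String × List Int × Int :=
  let current_tandem_as_set := PySem.Set.ofList [current_tandem_name]
  if ¬ (PySem.Set.equal (PySem.Set.inter st.1 current_tandem_as_set) current_tandem_as_set = true) then
    (PySem.Set.union st.1 current_tandem_as_set, st.2.1, st.2.2 + 1)
  else
    (st.1, st.2.1 ++ [st.2.2], st.2.2 + 1)

def evaluate (combination : List String) : Int × List Int :=
  let st := combination.foldl evaluate_step (PySem.Set.empty, ([] : List Int), (0 : Int))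
  (PySem.Set.len st.1, st.2.1)

-- ===== PORT B =====
-- the body of B's table-building loop: groups.setdefault(name, []).append(i)
def evaluate_alt_step (d : PySem.Dict String (List Int)) (p : Int × String) :
    PySem.Dict String (List Int) :=
  d.modify p.2 [] (fun idxs => idxs ++ [p.1])

def evaluate_alt (combination : List String) : Int × List Int :=
  let groups := (PySem.List.enumerate combination).foldl evaluate_alt_step PySem.Dict.empty
  let unassigneds :=
    PySem.List.sorted (groups.values.flatMap (fun idxs => PySem.List.slice idxs (some 1) none))
      (fun i => i) false
  ((groups.size : Int), unassigneds)

-- ===== PRECONDITION & SPEC =====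
def Spec_evaluate (combination : List String) (out : Int × List Int) : Prop := out = evaluate_alt combination
instance (combination : List String) (out : Int × List Int) : Decidable (Spec_evaluate combination out) := by unfold Spec_evaluate; infer_instance

-- ===== CLAIM (what is proved, stated in full; the proofs are below) =====
def Claim_equal_evaluate : Prop := ∀ (combination : List String), Dom_evaluate combination → Spec_evaluate combination (evaluate combination)

-- ===== LEMMAS AND PROOFS =====

-- the duplicate indices A collects, read off an enumerated list against a seen-set
def pvDup (ps : List (Int × String)) (s : PySem.Set String) : List Int :=
  match ps with
  | [] => []
  | (i, x) :: ps => if PySem.Set.contains s x then i :: pvDup ps s else pvDup ps (PySem.Set.add s x)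

-- the per-key block B contributes: positions of key k, minus the first unless k was pre-seen
def pvG (ps : List (Int × String)) (s : PySem.Set String) (k : String) : List Int :=
  ((ps.filter (fun p => p.2 == k)).map (fun p => p.1)).drop
    (if PySem.Set.contains s k then 0 else 1)

theorem pv_ofList_singleton (x : String) : PySem.Set.ofList [x] = [x] := rfl

theorem pv_cond_eq (s : PySem.Set String) (x : String) :
    PySem.Set.equal (PySem.Set.inter s (PySem.Set.ofList [x])) (PySem.Set.ofList [x])
      = PySem.Set.contains s x := by
  rw [pv_ofList_singleton]
  by_cases hx : x ∈ s
  · have h1 : PySem.Set.equal (PySem.Set.inter s [x]) [x] = true := by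
      rw [PySem.Set.equal_iff]
      intro y
      constructor
      · intro hy; exact ((PySem.Set.mem_inter s [x] y).mp hy).2
      · intro hy
        have hyx : y = x := List.mem_singleton.mp hy
        rw [hyx]
        exact (PySem.Set.mem_inter s [x] x).mpr ⟨hx, List.mem_singleton_self x⟩
    rw [h1, eq_comm, PySem.Set.contains_iff]; exact hx
  · have h1 : PySem.Set.equal (PySem.Set.inter s [x]) [x] = false := by
      rw [Bool.eq_false_iff]
      intro hc
      rw [PySem.Set.equal_iff] at hc
      have := (hc x).mpr (List.mem_singleton_self x)
      exact hx ((PySem.Set.mem_inter s [x] x).mp this).1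
    rw [h1, eq_comm, Bool.eq_false_iff]
    intro hc
    exact hx ((PySem.Set.contains_iff s x).mp hc)

theorem pv_union_singleton (s : PySem.Set String) (x : String) :
    PySem.Set.union s (PySem.Set.ofList [x]) = PySem.Set.add s x := rfl

-- A's fold, characterised
theorem pv_foldA (l : List String) (s : PySem.Set String) (acc : List Int) (i : Int) :
    l.foldl evaluate_step (s, acc, i)
      = (PySem.Set.update s l, acc ++ pvDup (PySem.List.enumerate l i) s, i + l.length) := by
  induction l generalizing s acc i with
  | nil => simp [PySem.Set.update, pvDup, PySem.List.enumerate]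
  | cons x t ih =>
    rw [List.foldl_cons, PySem.List.enumerate_cons]
    by_cases hx : PySem.Set.contains s x = true
    · have hmem : x ∈ s := (PySem.Set.contains_iff s x).mp hx
      have hstep : evaluate_step (s, acc, i) x = (s, acc ++ [i], i + 1) := by
        simp only [evaluate_step, pv_cond_eq, hx]
        simp
      rw [hstep, ih, PySem.Set.update_cons, PySem.Set.add_of_mem hmem]
      simp only [Prod.mk.injEq, List.length_cons]
      refine ⟨trivial, ?_, ?_⟩
      · simp [pvDup, hmem, List.append_assoc]
      · push_cast; ring
    · have hx' : PySem.Set.contains s x = false := Bool.eq_false_iff.mpr hx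
      have hxmem : x ∉ s := fun h => hx ((PySem.Set.contains_iff s x).mpr h)
      have hstep : evaluate_step (s, acc, i) x = (PySem.Set.add s x, acc, i + 1) := by
        simp only [evaluate_step, pv_cond_eq, hx', pv_union_singleton]
        simp
      rw [hstep, ih, PySem.Set.update_cons]
      simp only [Prod.mk.injEq, List.length_cons]
      refine ⟨trivial, ?_, ?_⟩
      · simp [pvDup, hxmem]
      · push_cast; ring

theorem pv_flatMap_congr {α β : Type} {l : List α} {f g : α → List β}
    (h : ∀ a ∈ l, f a = g a) : l.flatMap f = l.flatMap g := by
  induction l with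
  | nil => rfl
  | cons a t ih =>
    simp only [List.flatMap_cons]
    rw [h a (List.mem_cons_self), ih (fun b hb => h b (List.mem_cons_of_mem _ hb))]

theorem pv_contains_add_of_ne (s : PySem.Set String) (x k : String) (hk : k ≠ x) :
    PySem.Set.contains (PySem.Set.add s x) k = PySem.Set.contains s k := by
  cases h : PySem.Set.contains s k
  · rw [Bool.eq_false_iff]
    intro hc
    rcases (PySem.Set.mem_add s x k).mp ((PySem.Set.contains_iff _ k).mp hc) with h1 | h1
    · rw [Bool.eq_false_iff] at h
      exact h ((PySem.Set.contains_iff s k).mpr h1)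
    · exact hk h1
  · exact (PySem.Set.contains_iff _ k).mpr
      ((PySem.Set.mem_add s x k).mpr (Or.inl ((PySem.Set.contains_iff s k).mp h)))

theorem pv_G_cons_ne (ps : List (Int × String)) (s : PySem.Set String) (i : Int) (x k : String)
    (hk : k ≠ x) : pvG ((i, x) :: ps) s k = pvG ps s k := by
  simp only [pvG, List.filter_cons]
  have : ((i, x).2 == k) = false := by
    simp only [beq_eq_false_iff_ne]
    exact fun h => hk h.symm
  rw [this]
  simp

-- the main permutation: A's in-order duplicate list is a rearrangement of B's table blocks
theorem pv_perm (ps : List (Int × String)) (s : PySem.Set String) (hnd : s.Nodup) :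
    (pvDup ps s).Perm
      ((PySem.Set.update s (ps.map (fun p => p.2))).flatMap (pvG ps s)) := by
  induction ps generalizing s with
  | nil =>
    simp [pvDup, pvG, PySem.Set.update]
  | cons p t ih =>
    obtain ⟨i, x⟩ := p
    simp only [List.map_cons, PySem.Set.update_cons]
    by_cases hx : PySem.Set.contains s x = true
    · -- seen before: A emits i; B's block for x gains i at its head
      have hmem : x ∈ s := (PySem.Set.contains_iff s x).mp hx
      have hadd : PySem.Set.add s x = s := PySem.Set.add_of_mem hmem
      rw [hadd]
      have hK : x ∈ PySem.Set.update s (t.map (fun p => p.2)) :=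
        (PySem.Set.mem_update s (t.map (fun p => p.2)) x).mpr (Or.inl hmem)
      have hKnd : (PySem.Set.update s (t.map (fun p => p.2))).Nodup :=
        PySem.Set.nodup_update s (t.map (fun p => p.2)) hnd
      obtain ⟨l1, l2, hsplit⟩ := List.append_of_mem hK
      rw [hsplit] at hKnd
      have hx12 : x ∉ l1 ∧ x ∉ l2 := by
        rw [List.nodup_middle, List.nodup_cons] at hKnd
        simp only [List.mem_append] at hKnd
        exact ⟨fun h => hKnd.1 (Or.inl h), fun h => hKnd.1 (Or.inr h)⟩
      have hGx : pvG ((i, x) :: t) s x = i :: pvG t s x := by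
        simp only [pvG, List.filter_cons]
        simp [hmem]
      have hne1 : ∀ k ∈ l1, pvG ((i, x) :: t) s k = pvG t s k := by
        intro k hk
        exact pv_G_cons_ne t s i x k (fun h => hx12.1 (h ▸ hk))
      have hne2 : ∀ k ∈ l2, pvG ((i, x) :: t) s k = pvG t s k := by
        intro k hk
        exact pv_G_cons_ne t s i x k (fun h => hx12.2 (h ▸ hk))
      simp only [pvDup, hx, if_pos]
      rw [hsplit, List.flatMap_append, List.flatMap_cons]
      rw [pv_flatMap_congr hne1, pv_flatMap_congr hne2, hGx]
      have hassoc : l1.flatMap (pvG t s) ++ ((i :: pvG t s x) ++ l2.flatMap (pvG t s))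
          = l1.flatMap (pvG t s) ++ i :: (pvG t s x ++ l2.flatMap (pvG t s)) := by simp
      rw [hassoc]
      refine List.Perm.trans (List.Perm.cons i ?_) List.perm_middle.symm
      have ihs := ih s hnd
      rw [hsplit, List.flatMap_append, List.flatMap_cons] at ihs
      simpa [List.append_assoc] using ihs
    · -- fresh name: A adds x to the seen-set; B's block for x loses exactly its first index i
      have hx' : PySem.Set.contains s x = false := Bool.eq_false_iff.mpr hx
      have hxmem : x ∉ s := fun h => hx ((PySem.Set.contains_iff s x).mpr h)
      simp only [pvDup]
      rw [if_neg hx]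
      have hcong : ∀ k ∈ PySem.Set.update (PySem.Set.add s x) (t.map (fun p => p.2)),
          pvG ((i, x) :: t) s k = pvG t (PySem.Set.add s x) k := by
        intro k _
        by_cases hk : k = x
        · subst hk
          simp only [pvG, List.filter_cons]
          simp [hxmem]
        · rw [pv_G_cons_ne t s i x k hk]
          simp only [pvG, pv_contains_add_of_ne s x k hk]
      rw [pv_flatMap_congr hcong]
      exact ih (PySem.Set.add s x) (PySem.Set.nodup_add s x hnd)

theorem pv_mem_dup (ps : List (Int × String)) (s : PySem.Set String) (j : Int)
    (h : j ∈ pvDup ps s) : j ∈ ps.map (fun p => p.1) := by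
  induction ps generalizing s with
  | nil => simp [pvDup] at h
  | cons p t ih =>
    obtain ⟨i, x⟩ := p
    simp only [pvDup] at h
    by_cases hx : PySem.Set.contains s x = true
    · rw [if_pos hx] at h
      rcases List.mem_cons.mp h with h1 | h1
      · simp [h1]
      · exact List.mem_cons_of_mem _ (ih _ h1)
    · rw [if_neg hx] at h
      exact List.mem_cons_of_mem _ (ih _ h)

theorem pv_pairwise_dup (ps : List (Int × String)) (s : PySem.Set String)
    (h : ps.Pairwise (fun p q => p.1 < q.1)) : (pvDup ps s).Pairwise (· < ·) := by
  induction ps generalizing s with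
  | nil => simp [pvDup]
  | cons p t ih =>
    obtain ⟨i, x⟩ := p
    rw [List.pairwise_cons] at h
    simp only [pvDup]
    by_cases hx : PySem.Set.contains s x = true
    · rw [if_pos hx, List.pairwise_cons]
      refine ⟨fun j hj => ?_, ih _ h.2⟩
      have := pv_mem_dup t s j hj
      simp only [List.mem_map] at this
      obtain ⟨q, hq, hq2⟩ := this
      rw [← hq2]
      exact h.1 q hq
    · rw [if_neg hx]
      exact ih _ h.2

theorem pv_evaluate_eq (c : List String) :
    evaluate c = (((PySem.Set.ofList c).length : Int),
      pvDup (PySem.List.enumerate c 0) PySem.Set.empty) := by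
  show (PySem.Set.len (c.foldl evaluate_step (PySem.Set.empty, ([] : List Int), (0 : Int))).1,
        (c.foldl evaluate_step (PySem.Set.empty, ([] : List Int), (0 : Int))).2.1) = _
  rw [pv_foldA]
  simp [PySem.Set.len, PySem.Set.empty, PySem.Set.update_nil_left]

theorem pv_getD_fold (l : List (Int × String)) (d : PySem.Dict String (List Int)) (k : String) :
    (l.foldl evaluate_alt_step d).getD k []
      = d.getD k [] ++ (l.filter (fun p => p.2 == k)).map (fun p => p.1) := by
  have h := PySem.Dict.getD_foldl_modify_append (l := l.map (fun p => (p.2, p.1))) (d := d) (c := k)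
  simpa [evaluate_alt_step, List.foldl_map, List.filter_map, Function.comp, List.map_map] using h

theorem pv_pvG_nil (ps : List (Int × String)) (k : String) :
    pvG ps PySem.Set.empty k = ((ps.filter (fun p => p.2 == k)).map (fun p => p.1)).tail := by
  simp [pvG, List.drop_one]

theorem pv_evaluate_alt_eq (c : List String) :
    evaluate_alt c = (((PySem.Set.ofList c).length : Int),
      PySem.List.sorted
        ((PySem.Set.ofList c).flatMap (pvG (PySem.List.enumerate c 0) PySem.Set.empty))
        (fun i => i) false) := by
  have hkeys0 := PySem.Dict.keys_foldl_modify_key (PySem.List.enumerate c 0)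
      (fun p => p.2) ([] : List Int) (fun _ p idxs => idxs ++ [p.1]) PySem.Dict.empty
  have hkeys : ((PySem.List.enumerate c 0).foldl evaluate_alt_step PySem.Dict.empty).keys
      = PySem.Set.ofList c := by
    rw [show ((PySem.List.enumerate c 0).foldl evaluate_alt_step PySem.Dict.empty).keys
        = (List.foldl (fun d x => PySem.Dict.modify d ((fun p => (p : Int × String).2) x)
            ([] : List Int) ((fun _ p idxs => idxs ++ [p.1]) d x)) PySem.Dict.empty
            (PySem.List.enumerate c 0)).keys from rfl]
    rw [hkeys0]
    simp [PySem.List.map_snd_enumerate, PySem.Set.update_nil_left, PySem.Dict.keys,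
      PySem.Dict.empty]
  have hnd : ((PySem.List.enumerate c 0).foldl evaluate_alt_step PySem.Dict.empty).keys.Nodup := by
    rw [hkeys]; exact PySem.Set.nodup_ofList c
  have hsize : (((PySem.List.enumerate c 0).foldl evaluate_alt_step PySem.Dict.empty).size : Int)
      = ((PySem.Set.ofList c).length : Int) := by
    have h := congrArg List.length hkeys
    simp only [PySem.Dict.keys, List.length_map] at h
    simp [PySem.Dict.size, h]
  have hget : ∀ k, ((PySem.List.enumerate c 0).foldl evaluate_alt_step PySem.Dict.empty).getD k []
      = ((PySem.List.enumerate c 0).filter (fun p => p.2 == k)).map (fun p => p.1) := by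
    intro k
    have h0 : (PySem.Dict.empty : PySem.Dict String (List Int)).getD k [] = [] := rfl
    rw [pv_getD_fold, h0, List.nil_append]
  have hflat : ((PySem.List.enumerate c 0).foldl evaluate_alt_step PySem.Dict.empty).values.flatMap
        (fun idxs => PySem.List.slice idxs (some 1) none)
      = (PySem.Set.ofList c).flatMap (pvG (PySem.List.enumerate c 0) PySem.Set.empty) := by
    rw [PySem.Dict.values_eq_map_keys _ hnd ([] : List Int), hkeys, List.flatMap_map]
    refine pv_flatMap_congr ?_
    intro k _
    rw [PySem.List.slice_from_one, hget k, pv_pvG_nil]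
  show ((((PySem.List.enumerate c 0).foldl evaluate_alt_step PySem.Dict.empty).size : Int),
      PySem.List.sorted
        (((PySem.List.enumerate c 0).foldl evaluate_alt_step PySem.Dict.empty).values.flatMap
          (fun idxs => PySem.List.slice idxs (some 1) none)) (fun i => i) false) = _
  rw [hsize, hflat]

theorem pv_evaluate_eq_alt (c : List String) : evaluate c = evaluate_alt c := by
  rw [pv_evaluate_eq, pv_evaluate_alt_eq]
  have hperm : (pvDup (PySem.List.enumerate c 0) PySem.Set.empty).Perm
      ((PySem.Set.ofList c).flatMap (pvG (PySem.List.enumerate c 0) PySem.Set.empty)) := by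
    have h := pv_perm (PySem.List.enumerate c 0) PySem.Set.empty List.nodup_nil
    simpa [PySem.List.map_snd_enumerate, PySem.Set.empty, PySem.Set.update_nil_left] using h
  have hpair : (pvDup (PySem.List.enumerate c 0) PySem.Set.empty).Pairwise (· < ·) :=
    pv_pairwise_dup _ _ (PySem.List.pairwise_lt_enumerate c 0)
  have hs := PySem.List.sorted_eq_of_perm_of_pairwise_lt
      ((PySem.Set.ofList c).flatMap (pvG (PySem.List.enumerate c 0) PySem.Set.empty))
      (pvDup (PySem.List.enumerate c 0) PySem.Set.empty)
      (fun i => i) hperm (by simpa using hpair)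
  rw [hs]

-- ===== VERDICT (by name: the statement is the Claim_ definition above) =====
theorem evaluate_spec : Claim_equal_evaluate := by
  intro c _
  unfold Spec_evaluate
  exact pv_evaluate_eq_alt c
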